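/- GENERATED by mk_final_copies.py from the proof of the farm's unit `start_decoder.C13a` (farm:start_decoder.C13a.1: Lemmas.lean) as the
   re-elaboration sweep compiled it — do not edit. -/
import Asan.CheckWalk
import Vorbis.Spec.StartDecoderATest
import Vorbis.Spec.StartDecoderCarry
import Vorbis.Spec.Units.start_decoder_C13a

open X86 X86.User Asan Vorbis Vorbis.Spec Vorbis.Spec.StartDecoder

set_option maxRecDepth 100000
set_option maxHeartbeats 4000000

namespace Vorbis.Spec.start_decoder_C13a

/-- **A check site inside the struct `cb(i)`** (`k` bytes at `c + off`, `c = codebooks + 2120·i`): inside the codebooks block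
(`CodebooksOK` over the function's block predicate: `SDw.cb0`), which is live (`Env.live`). -/
theorem c13a_site {g : Ghost} {i : Nat} {A2 A3 Ai : Arena} {A : Arena × List Obj} {v : State}
    (hc : Cur g i A2 A3 Ai A v) (off k : Nat) (h1 : 1 ≤ k) (h2 : off + k ≤ 2120) :
    Site (Live (stackObjs g.frames' ++ A.2)) (g.cb v.mem i + off) k := by
  rcases (hc.sd.cb0 (by omega)).1 with h0 | hok
  · exact absurd h0 (hc.sd.cb0 (by omega)).2
  · exact hok.site_cb_field hc.sd.env.live i hc.lt off k h2 h1 rfl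

/-- **The check site `c->sorted_values[j]`** (0x115086) of a sparse book, `j < N(c) = sorted_entries`: inside K4's `sorted_values`
block (allocated between the snapshots `Ai` and `Am`, a setup block of the arena, hence live). -/
theorem c13a_site_sv {u₀ : State} {g : Ghost} {i : Nat} {A2 A3 Ai Am : Arena} {A : Arena × List Obj} {mults j : Nat} {v : State}
    (h : InC13 u₀ g i A2 A3 Ai Am A mults j v) (hsp : Codebook.sparse v.mem (g.cb v.mem i) ≠ 0)
    (hj : (j : Int) < Codebook.N v.mem (g.cb v.mem i)) :
    Site (Live (stackObjs g.frames' ++ A.2)) (Codebook.sorted_values v.mem (g.cb v.mem i) + 4 * j) 4 := by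
  have hN : Codebook.N v.mem (g.cb v.mem i) = Codebook.sorted_entries v.mem (g.cb v.mem i) := by
    unfold Codebook.N
    rw [if_neg hsp]
  rw [hN] at hj
  have hse : 1 ≤ Codebook.sorted_entries v.mem (g.cb v.mem i) := by omega
  have hB : A.1.Blk (Codebook.svBlock v.mem (g.cb v.mem i)) := ((h.k.k4.sv hse).mono h.extm').blk
  have hlive := h.cur.sd.arena.block_live (objs := stackObjs g.frames' ++ A.2) (fun o ho => List.mem_append_right _ ho) hB
  apply Site.of_block hlive
  · simp only []
    omega
  · simp only []
    omega
  · omega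

/-- **A window the entry of the inner loop may write**: the stack below the steady `R` (the return address of a check call, the
check routine's frame) and the two dword locals `d[R+48H]` (`z`), `d[R+4CH]` (the spill of `sparse`). -/
def c13a_Win (g : Ghost) (w : Span) : Prop :=
  (g.R - 408 ≤ w.lo ∧ w.hi ≤ g.R) ∨ (g.R + 0x48 ≤ w.lo ∧ w.hi ≤ g.R + 0x50)

/-- **INTO THE INNER LOOP** (the exit 0x1150a1 `jmp 0x114f32` of `C13a`): from `InC13` at the outer head over a stretch that writes
only `c13a_Win` windows, `In13K` at the inner head with `k = 0`, `div = 1`, the spilled `sparse` (`hslot`: read back from the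
store of 0x11509c) and `j < N` (the `jge` of 0x11505e not taken). The proof is that of `C13.core13` + `C13.carry13`, from `InC13`. -/
theorem c13a_enter {u₀ : State} {g : Ghost} {i : Nat} {A2 A3 Ai Am : Arena} {A : Arena × List Obj} {mults : Nat} {n d : Int}
    {j : Nat} {v w : State} {ws : List Span}
    (h : InC13 u₀ g i A2 A3 Ai Am A mults j v)
    (hn : Codebook.N v.mem (g.cb v.mem i) = n) (hd : Codebook.dimensions v.mem (g.cb v.mem i) = d)
    (hs : Mem.SameExcept ws v.mem w.mem) (hun : ShadowUntouched v.mem w.mem) (hq : ∀ x, x ∈ ws → c13a_Win g x)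
    (hrip : w.rip = L.start_decoder.loop12) (hrsp : w.reg .rsp = v.reg .rsp) (hcode : CodeOK u₀ w.mem) (hinv : abiInv w)
    (hr14 : w.reg .r14 = v.reg .r14) (hr12 : w.reg .r12 = addr j) (hj : (j : Int) < Codebook.N v.mem (g.cb v.mem i))
    (hr15 : w.reg .r15 = addr 0) (hrbx : w.reg .rbx = addr 1)
    (hslot : w.mem.u32 (g.R + 0x4c) = Codebook.sparse v.mem (g.cb v.mem i)) :
    In13K u₀ g i A2 A3 Ai Am A mults n d j 0 L.start_decoder.loop12 w := by
  have hfr := h.frame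
  have hpos : Pos g A := Pos.of hfr h.cur
  have hm0 : MInv g i A2 A3 Ai A v.mem := MInv.of hfr h.cur
  have hcw := hm0.c_where
  have p1 := hpos.r_eq
  have p2 := hpos.ra_lo
  have p3 := hpos.ra_hi
  have hq0 : ∀ x, x ∈ ws → OkWin0 g (g.cb v.mem i) x := by
    intro x hx
    have k := hq x hx
    unfold c13a_Win at k
    unfold OkWin0
    omega
  have hq1 : ∀ x, x ∈ ws → OkWin0 g (g.cb v.mem i + 2120) x := by
    intro x hx
    have k := hq x hx
    unfold c13a_Win at k
    unfold OkWin0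
    omega
  have hb : Bits (g.Blk A) g.len w.mem g.f := by
    apply bits_kept hpos hm0.sd.bits hs
    intro x hx
    have k := hq x hx
    unfold c13a_Win at k
    omega
  have hF := Frame.step hfr h.cur hs hun (fun x hx => (hq0 x hx).ok) hb hrip hrsp hcode hinv
  obtain ⟨hC, hcb⟩ := Cur.step hfr h.cur hs hun (fun x hx => (hq0 x hx).ok) hb hr14
  -- the struct `cb(i)` and the `sorted_values` block
  have hstruct : (Codebook.block (g.cb v.mem i)).Kept v.mem w.mem := by
    apply blk_kept0 (c := g.cb v.mem i + 2120) hpos hs hq1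
    · simp only [vblock, voff]
      omega
    · simp only [vblock, voff]
      omega
  have hsf := Codebook.SameFields.of_kept hstruct
  have hsv : 1 ≤ Codebook.sorted_entries v.mem (g.cb v.mem i) →
      (Codebook.svBlock v.mem (g.cb v.mem i)).Kept v.mem w.mem := by
    intro hse
    exact young_kept0 hm0 hpos hs hq0 ((h.k.k4.sv hse).mono h.extm')
  have hk15 : K15 (Since Ai Am) w.mem (g.cb v.mem i) := h.k.frame hstruct hsv
  have eN : Codebook.N w.mem (g.cb v.mem i) = Codebook.N v.mem (g.cb v.mem i) := by
    unfold Codebook.N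
    rw [hsf.sparse, hsf.entries, hsf.sorted_entries]
  -- the two stack slots the invariant reads besides the spilled `sparse`
  have hst : Mem.EqOn (g.R + 0x28) (g.R + 0x30) v.mem w.mem := by
    apply hs.eqOn
    intro x hx
    have k := hq x hx
    unfold c13a_Win at k
    omega
  have hst44 : Mem.EqOn (g.R + 0x44) (g.R + 0x48) v.mem w.mem := by
    apply hs.eqOn
    intro x hx
    have k := hq x hx
    unfold c13a_Win at k
    omega
  have e28 := hst.u64 (g.R + 0x28) (Nat.le_refl _) (by omega) (by omega)
  have e44 := hst44.i32 (g.R + 0x44) (Nat.le_refl _) (by omega) (by omega)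
  have hd1 := h.k.k1.dim_pos
  exact
    { frame := hF
      cur := hC
      extm := h.extm
      extm' := h.extm'
      k := by rw [hcb]; exact hk15
      type1 := by rw [hcb, hsf.lookup_type]; exact h.type1
      r12 := hr12
      j_lt := by rw [hcb, eN]; exact hj
      slot_len := by rw [hcb, eN, e44]; exact h.slot_len
      prod_le := by rw [hcb, eN, hsf.dimensions]; exact h.prod_le
      mu := by rw [hcb, eN, hsf.dimensions, hsf.multiplicands]; exact h.mu
      mults :=
        { slot := by rw [e28]; exact h.mults.slot
          temps := by rw [hcb, hsf.lookup_values]; exact h.mults.temps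
          lv_pos := by rw [hcb, hsf.lookup_values]; exact h.mults.lv_pos
          lv_lt := by rw [hcb, hsf.lookup_values]; exact h.mults.lv_lt }
      r15 := hr15
      k_le := by
        rw [hcb, hsf.dimensions]
        show ((0 : Nat) : Int) ≤ _
        omega
      div := ⟨1, hrbx, Nat.le_refl _, by decide⟩
      slot_sp := by rw [hcb, hsf.sparse]; exact hslot
      n_eq := by rw [hcb, eN]; exact hn
      d_eq := by rw [hcb, hsf.dimensions]; exact hd }

/-- **A window the exit of the outer loop may write**: the stack below the steady `R` (the return address of the check call, the
check routine's frame) and the byte `c->lookup_type` (`c + 19H`). Non-empty (an empty window at the struct's edge says nothing). -/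
def c13a_WinT (g : Ghost) (c : Nat) (w : Span) : Prop :=
  w.lo < w.hi ∧ ((g.R - 408 ≤ w.lo ∧ w.hi ≤ g.R) ∨ (c + 25 ≤ w.lo ∧ w.hi ≤ c + 26))

/-- **OUT OF THE OUTER LOOP** (the exit 0x1150b4 `jmp 0x114dfa` of `C13a`): from `InC13` over a stretch that writes only `c13a_WinT`
windows and leaves `lookup_type = 2` (`ht`: read back from the store of 0x1150af), `InC15`: K1 – K5 do not read `lookup_type`
(`K15.of_fields`), K6 is built from `InC13.prod_le` and `InC13.mu`. -/
theorem c13a_exit15 {u₀ : State} {g : Ghost} {i : Nat} {A2 A3 Ai Am : Arena} {A : Arena × List Obj} {mults : Nat}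
    {j : Nat} {v w : State} {ws : List Span}
    (h : InC13 u₀ g i A2 A3 Ai Am A mults j v)
    (hs : Mem.SameExcept ws v.mem w.mem) (hun : ShadowUntouched v.mem w.mem)
    (hq : ∀ x, x ∈ ws → c13a_WinT g (g.cb v.mem i) x)
    (hrip : w.rip = pc_C15) (hrsp : w.reg .rsp = v.reg .rsp) (hcode : CodeOK u₀ w.mem) (hinv : abiInv w)
    (hr14 : w.reg .r14 = v.reg .r14)
    (ht : Codebook.lookup_type w.mem (g.cb v.mem i) = 2) :
    InC15 u₀ g i A2 A3 Ai A mults w := by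
  have hfr := h.frame
  have hpos : Pos g A := Pos.of hfr h.cur
  have hm0 : MInv g i A2 A3 Ai A v.mem := MInv.of hfr h.cur
  have hcw := hm0.c_where
  have p1 := hpos.r_eq
  have p2 := hpos.ra_lo
  have p3 := hpos.ra_hi
  have hq0 : ∀ x, x ∈ ws → OkWin0 g (g.cb v.mem i) x := by
    intro x hx
    have k := hq x hx
    unfold c13a_WinT at k
    unfold OkWin0
    omega
  have hb : Bits (g.Blk A) g.len w.mem g.f := by
    apply bits_kept hpos hm0.sd.bits hs
    intro x hx
    have k := hq x hx
    unfold c13a_WinT at k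
    omega
  have hF := Frame.step hfr h.cur hs hun (fun x hx => (hq0 x hx).ok) hb hrip hrsp hcode hinv
  obtain ⟨hC, hcb⟩ := Cur.step hfr h.cur hs hun (fun x hx => (hq0 x hx).ok) hb hr14
  -- the fields of the struct but `lookup_type`, `fast_huffman`, the `sorted_values` block
  have hbf : BookFields v.mem w.mem (g.cb v.mem i) := by
    apply BookFields.of_step0 hm0 hpos rfl hs hq0
    intro x hx h1 h2
    have k := hq x hx
    unfold c13a_WinT at k
    omega
  have efh : Mem.EqOn (g.cb v.mem i + 48) (g.cb v.mem i + 2096) v.mem w.mem := by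
    apply hs.eqOn
    intro x hx
    have k := hq x hx
    unfold c13a_WinT at k
    omega
  have hsv : 1 ≤ Codebook.sorted_entries v.mem (g.cb v.mem i) →
      (Codebook.svBlock v.mem (g.cb v.mem i)).Kept v.mem w.mem := by
    intro hse
    exact young_kept0 hm0 hpos hs hq0 ((h.k.k4.sv hse).mono h.extm')
  have hk15 : K15 (Since Ai Am) w.mem (g.cb v.mem i) := h.k.of_fields hbf (by omega) efh hsv
  have hk : K15 (Since Ai A.1) w.mem (g.cb v.mem i) := hk15.mono (fun B hB => hB.mono h.extm')
  have eN : Codebook.N w.mem (g.cb v.mem i) = Codebook.N v.mem (g.cb v.mem i) := by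
    unfold Codebook.N
    rw [hbf.sparse, hbf.entries, hbf.sorted_entries]
  have hst : Mem.EqOn (g.R + 0x28) (g.R + 0x30) v.mem w.mem := by
    apply hs.eqOn
    intro x hx
    have k := hq x hx
    unfold c13a_WinT at k
    omega
  have e28 := hst.u64 (g.R + 0x28) (Nat.le_refl _) (by omega) (by omega)
  have hk6 : Codebook.K6 (Since Ai A.1) w.mem (g.cb v.mem i) := by
    refine ⟨Or.inr ht, fun _ => ?_, fun _ => ⟨_, Nat.le_refl _, ?_⟩, fun h0 => ?_⟩
    · rw [eN, hbf.dimensions]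
      exact h.prod_le
    · rw [eN, hbf.dimensions, hbf.multiplicands]
      exact h.mu.older h.extm
    · rw [ht] at h0
      exact absurd h0 (by decide)
  exact
    { frame := hF
      cur := hC
      ok := by rw [hcb]; exact hk.toOK hk6
      mults :=
        { slot := by rw [e28]; exact h.mults.slot
          temps := by rw [hcb, hbf.lookup_values]; exact h.mults.temps
          lv_pos := by rw [hcb, hbf.lookup_values]; exact h.mults.lv_pos
          lv_lt := by rw [hcb, hbf.lookup_values]; exact h.mults.lv_lt } }

end Vorbis.Spec.start_decoder_C13a
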